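-- pv_equiv track=rewrite | github.com/pizzama/framework | mod_team/battle/templebattle.py | get_hp_buff
-- ===== SOURCE A (Python) =====
-- def get_hp_buff(battle_effect_list, country):
--     hp_buff = [0, 0, 0]
--     for buff in battle_effect_list:
--         if buff[2] == 12 and buff[3] in (0, country):
--             hp_buff[1] += buff[4]
--         elif buff[2] == 46 and buff[3] in (0, country):
--             hp_buff[0] += buff[4]
--         elif buff[2] == 47 and buff[3] in (0, country):
--             hp_buff[2] += buff[4]
--         elif buff[2] == 50 and buff[3] in (0, country):
--             hp_buff[1] += buff[4]
--     return hp_buff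
-- ===== SOURCE B (Python) =====
-- def get_hp_buff(battle_effect_list, country):
--     def ok(b):
--         return b[3] in (0, country)
--     h46 = sum(b[4] for b in battle_effect_list if b[2] == 46 and ok(b))
--     h12_50 = sum(b[4] for b in battle_effect_list if b[2] in (12, 50) and ok(b))
--     h47 = sum(b[4] for b in battle_effect_list if b[2] == 47 and ok(b))
--     return [h46, h12_50, h47]
-- ===== Notes on version B (the rewrite author's own statement) =====
-- stated objective: alternative
-- what changed: Replaces A's single pass mutating a 3-slot accumulator through a 4-way elif chain by three independent filtered sums (one per output slot), assembled into the result list at the end.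
import Mathlib
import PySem

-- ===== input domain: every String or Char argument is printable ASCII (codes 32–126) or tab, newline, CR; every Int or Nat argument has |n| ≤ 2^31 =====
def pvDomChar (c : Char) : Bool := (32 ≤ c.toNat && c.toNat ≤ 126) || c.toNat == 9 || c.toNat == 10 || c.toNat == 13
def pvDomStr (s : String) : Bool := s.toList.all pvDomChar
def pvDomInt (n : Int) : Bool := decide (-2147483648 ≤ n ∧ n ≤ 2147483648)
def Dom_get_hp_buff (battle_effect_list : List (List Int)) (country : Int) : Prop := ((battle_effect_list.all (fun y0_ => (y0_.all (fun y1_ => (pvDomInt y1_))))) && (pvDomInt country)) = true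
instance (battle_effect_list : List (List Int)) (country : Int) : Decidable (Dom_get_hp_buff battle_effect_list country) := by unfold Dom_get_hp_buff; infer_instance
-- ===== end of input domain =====

-- B replaces A's single pass over a mutated 3-slot accumulator by three independent
-- filtered sums, one per output slot (objective: alternative decomposition).

-- ===== PORT A =====
-- buff[i] is ported as List.getD (index literals are nonnegative, and Pre_ guarantees
-- each access A performs is in range, where getD = Python indexing exactly).
def get_hp_buff (battle_effect_list : List (List Int)) (country : Int) : List Int :=
  let hp := battle_effect_list.foldl (fun (hp : Int × Int × Int) buff =>
    if buff.getD 2 0 = 12 ∧ (buff.getD 3 0 = 0 ∨ buff.getD 3 0 = country) then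
      (hp.1, hp.2.1 + buff.getD 4 0, hp.2.2)
    else if buff.getD 2 0 = 46 ∧ (buff.getD 3 0 = 0 ∨ buff.getD 3 0 = country) then
      (hp.1 + buff.getD 4 0, hp.2.1, hp.2.2)
    else if buff.getD 2 0 = 47 ∧ (buff.getD 3 0 = 0 ∨ buff.getD 3 0 = country) then
      (hp.1, hp.2.1, hp.2.2 + buff.getD 4 0)
    else if buff.getD 2 0 = 50 ∧ (buff.getD 3 0 = 0 ∨ buff.getD 3 0 = country) then
      (hp.1, hp.2.1 + buff.getD 4 0, hp.2.2)
    else hp) (0, 0, 0)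
  [hp.1, hp.2.1, hp.2.2]

-- ===== PORT B =====
def pvOk (country : Int) (b : List Int) : Bool :=
  b.getD 3 0 == 0 || b.getD 3 0 == country

def get_hp_buff_alt (battle_effect_list : List (List Int)) (country : Int) : List Int :=
  let h46 := ((battle_effect_list.filter (fun b => b.getD 2 0 == 46 && pvOk country b)).map
      (fun b => b.getD 4 0)).sum
  let h1250 := ((battle_effect_list.filter (fun b => (b.getD 2 0 == 12 || b.getD 2 0 == 50) && pvOk country b)).map
      (fun b => b.getD 4 0)).sum
  let h47 := ((battle_effect_list.filter (fun b => b.getD 2 0 == 47 && pvOk country b)).map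
      (fun b => b.getD 4 0)).sum
  [h46, h1250, h47]

-- ===== PRECONDITION & SPEC =====
-- Pre_ = exactly the inputs on which A returns (no IndexError): each buff has the
-- indices A actually reads — 2 always; 3 when buff[2] is a matched type; 4 when the
-- country check also passes.
def pvBuffOk (country : Int) (b : List Int) : Bool :=
  3 ≤ b.length &&
  (!(b.getD 2 0 == 12 || b.getD 2 0 == 46 || b.getD 2 0 == 47 || b.getD 2 0 == 50) ||
    (4 ≤ b.length &&
      (!(b.getD 3 0 == 0 || b.getD 3 0 == country) || 5 ≤ b.length)))

def Pre_get_hp_buff (battle_effect_list : List (List Int)) (country : Int) : Prop :=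
  battle_effect_list.all (pvBuffOk country) = true
instance (battle_effect_list : List (List Int)) (country : Int) : Decidable (Pre_get_hp_buff battle_effect_list country) := by unfold Pre_get_hp_buff; infer_instance

def pvWitness_get_hp_buff : List (List Int) × Int := ([[1, 1, 46, 0, 7], [0, 0, 12, 3, 2], [9, 9, 99]], 3)

def Spec_get_hp_buff (battle_effect_list : List (List Int)) (country : Int) (out : List Int) : Prop := out = get_hp_buff_alt battle_effect_list country
instance (battle_effect_list : List (List Int)) (country : Int) (out : List Int) : Decidable (Spec_get_hp_buff battle_effect_list country out) := by unfold Spec_get_hp_buff; infer_instance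

-- ===== CLAIM (what is proved, stated in full; the proofs are below) =====
def Claim_equal_get_hp_buff : Prop := ∀ (battle_effect_list : List (List Int)) (country : Int), Dom_get_hp_buff battle_effect_list country → Pre_get_hp_buff battle_effect_list country → Spec_get_hp_buff battle_effect_list country (get_hp_buff battle_effect_list country)

-- ===== LEMMAS AND PROOFS =====
set_option maxHeartbeats 1000000 in
theorem foldl_eq_sums (l : List (List Int)) (country : Int) (x y z : Int) :
    l.foldl (fun (hp : Int × Int × Int) buff =>
      if buff[2]?.getD 0 = 12 ∧ (buff[3]?.getD 0 = 0 ∨ buff[3]?.getD 0 = country) then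
        (hp.1, hp.2.1 + buff[4]?.getD 0, hp.2.2)
      else if buff[2]?.getD 0 = 46 ∧ (buff[3]?.getD 0 = 0 ∨ buff[3]?.getD 0 = country) then
        (hp.1 + buff[4]?.getD 0, hp.2.1, hp.2.2)
      else if buff[2]?.getD 0 = 47 ∧ (buff[3]?.getD 0 = 0 ∨ buff[3]?.getD 0 = country) then
        (hp.1, hp.2.1, hp.2.2 + buff[4]?.getD 0)
      else if buff[2]?.getD 0 = 50 ∧ (buff[3]?.getD 0 = 0 ∨ buff[3]?.getD 0 = country) then
        (hp.1, hp.2.1 + buff[4]?.getD 0, hp.2.2)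
      else hp) (x, y, z)
    = (x + ((l.filter (fun b => b[2]?.getD 0 == 46 && (b[3]?.getD 0 == 0 || b[3]?.getD 0 == country))).map (fun b => b[4]?.getD 0)).sum,
       y + ((l.filter (fun b => (b[2]?.getD 0 == 12 || b[2]?.getD 0 == 50) && (b[3]?.getD 0 == 0 || b[3]?.getD 0 == country))).map (fun b => b[4]?.getD 0)).sum,
       z + ((l.filter (fun b => b[2]?.getD 0 == 47 && (b[3]?.getD 0 == 0 || b[3]?.getD 0 == country))).map (fun b => b[4]?.getD 0)).sum) := by
  induction l generalizing x y z with
  | nil => simp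
  | cons b t ih =>
    simp only [List.foldl_cons, List.filter_cons]
    by_cases h12 : b[2]?.getD 0 = (12 : Int) <;>
    by_cases h46 : b[2]?.getD 0 = (46 : Int) <;>
    by_cases h47 : b[2]?.getD 0 = (47 : Int) <;>
    by_cases h50 : b[2]?.getD 0 = (50 : Int) <;>
    by_cases hc : b[3]?.getD 0 = 0 ∨ b[3]?.getD 0 = country <;>
      simp [h12, h46, h47, h50, hc, ih, Prod.ext_iff] <;> omega

-- ===== VERDICT (by name: the statement is the Claim_ definition above) =====
theorem get_hp_buff_spec : Claim_equal_get_hp_buff := by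
  intro l country _ _
  unfold Spec_get_hp_buff get_hp_buff get_hp_buff_alt pvOk
  simp only [List.getD_eq_getElem?_getD, foldl_eq_sums, zero_add]
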